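-- pv_equiv track=rewrite | github.com/FawenYo/NTU_Programming-for-Business-Computing | Exam/quiz/problem2.py | solution
-- ===== SOURCE A (Python) =====
-- def solution(data, customer_action):
--     launch_num = 0
--     drink_num = 0
--     revenue = 0
--
--     # 便當價格
--     launch_price = data[0]
--     # 飲料價格
--     drink_price = data[1]
--     # 折價優惠
--     discount = data[2]
--
--     for each in customer_action:
--         # 只買便當
--         if each == 1:
--             launch_num += 1
--             revenue += launch_price
--         # 只買飲料
--         elif each == 2:
--             drink_num += 1
--             revenue += drink_price
--         # 買便當 ＆ 飲料
--         else:
--             launch_num += 1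
--             drink_num += 1
--             result = launch_price + drink_price - discount
--             if result < 0:
--                 result = 0
--             revenue += result
--     return str(launch_num), str(drink_num), str(revenue)
-- ===== SOURCE B (Python) =====
-- def solution(data, customer_action):
--     launch_price = data[0]
--     drink_price = data[1]
--     discount = data[2]
--     combo = max(launch_price + drink_price - discount, 0)
--
--     def agg(acts):
--         # divide-and-conquer aggregation of (launch_num, drink_num, revenue)
--         if not acts:
--             return (0, 0, 0)
--         if len(acts) == 1:
--             a = acts[0]
--             if a == 1:
--                 return (1, 0, launch_price)
--             if a == 2:
--                 return (0, 1, drink_price)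
--             return (1, 1, combo)
--         mid = len(acts) // 2
--         l = agg(acts[:mid])
--         r = agg(acts[mid:])
--         return (l[0] + r[0], l[1] + r[1], l[2] + r[2])
--
--     launch_num, drink_num, revenue = agg(customer_action)
--     return str(launch_num), str(drink_num), str(revenue)
-- ===== Notes on version B (the rewrite author's own statement) =====
-- stated objective: alternative
-- what changed: Replaces the left-to-right branching accumulator with a divide-and-conquer tree aggregation: each single action maps to a (launch, drink, revenue) contribution triple and halves are combined by componentwise addition, with the discounted combo price precomputed and clamped once.
import Mathlib
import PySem

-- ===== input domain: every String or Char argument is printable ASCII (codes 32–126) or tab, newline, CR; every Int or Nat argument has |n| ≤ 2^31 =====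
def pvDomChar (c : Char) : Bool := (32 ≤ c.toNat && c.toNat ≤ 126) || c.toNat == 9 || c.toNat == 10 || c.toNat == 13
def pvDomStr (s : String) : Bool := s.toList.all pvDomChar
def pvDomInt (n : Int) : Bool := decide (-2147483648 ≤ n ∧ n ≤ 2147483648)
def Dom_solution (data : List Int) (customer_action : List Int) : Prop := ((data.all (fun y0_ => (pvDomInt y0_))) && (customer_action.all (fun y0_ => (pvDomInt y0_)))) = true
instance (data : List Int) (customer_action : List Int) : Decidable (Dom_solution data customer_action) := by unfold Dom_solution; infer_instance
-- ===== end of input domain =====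

-- B replaces A's left-to-right branching accumulator with a divide-and-conquer tree aggregation of contribution triples (objective: alternative).


-- ===== PORT A =====
-- literal port of A: data[0..2] read via pyGet? (IndexError = none, excluded by Pre_), then a fold over customer_action
def solution (data : List Int) (customer_action : List Int) : String × String × String :=
  let launch_price := (PySem.List.pyGet? data 0).getD 0
  let drink_price := (PySem.List.pyGet? data 1).getD 0
  let discount := (PySem.List.pyGet? data 2).getD 0
  let s := customer_action.foldl (fun (st : Int × Int × Int) each =>
    if each = 1 then (st.1 + 1, st.2.1, st.2.2 + launch_price)
    else if each = 2 then (st.1, st.2.1 + 1, st.2.2 + drink_price)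
    else
      let result := launch_price + drink_price - discount
      let result := if result < 0 then 0 else result
      (st.1 + 1, st.2.1 + 1, st.2.2 + result)) (0, 0, 0)
  (PySem.Int.toStr s.1, PySem.Int.toStr s.2.1, PySem.Int.toStr s.2.2)

-- ===== PORT B =====
-- divide-and-conquer aggregation of (launch_num, drink_num, revenue), as in Source B's agg;
-- the fuel argument (instantiated with acts.length) is only a structural-termination device:
-- each recursive call splits a list of length ≥ 2 into two strictly shorter halves
def aggB (launch_price drink_price combo : Int) (fuel : Nat) (acts : List Int) : Int × Int × Int :=
  match fuel, acts with
  | _, [] => (0, 0, 0)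
  | _, [a] =>
    if a = 1 then (1, 0, launch_price)
    else if a = 2 then (0, 1, drink_price)
    else (1, 1, combo)
  | 0, _ :: _ :: _ => (0, 0, 0)  -- never reached when acts.length ≤ fuel
  | fuel + 1, x :: y :: rest =>
    let acts := x :: y :: rest
    let mid := acts.length / 2
    ((aggB launch_price drink_price combo fuel (acts.take mid)).1
       + (aggB launch_price drink_price combo fuel (acts.drop mid)).1,
     (aggB launch_price drink_price combo fuel (acts.take mid)).2.1
       + (aggB launch_price drink_price combo fuel (acts.drop mid)).2.1,
     (aggB launch_price drink_price combo fuel (acts.take mid)).2.2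
       + (aggB launch_price drink_price combo fuel (acts.drop mid)).2.2)

def solution_alt (data : List Int) (customer_action : List Int) : String × String × String :=
  let launch_price := (PySem.List.pyGet? data 0).getD 0
  let drink_price := (PySem.List.pyGet? data 1).getD 0
  let discount := (PySem.List.pyGet? data 2).getD 0
  let combo := max (launch_price + drink_price - discount) 0
  let s := aggB launch_price drink_price combo customer_action.length customer_action
  (PySem.Int.toStr s.1, PySem.Int.toStr s.2.1, PySem.Int.toStr s.2.2)

-- ===== PRECONDITION & SPEC =====
-- A indexes data[0], data[1], data[2]; it raises IndexError when data has fewer than 3 elements.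
def Pre_solution (data : List Int) (customer_action : List Int) : Prop := 3 ≤ data.length
instance (data : List Int) (customer_action : List Int) : Decidable (Pre_solution data customer_action) := by unfold Pre_solution; infer_instance
def pvWitness_solution : List Int × List Int := ([100, 30, 20], [1, 2, 3, 0, 1])

def Spec_solution (data : List Int) (customer_action : List Int) (out : String × String × String) : Prop := out = solution_alt data customer_action
instance (data : List Int) (customer_action : List Int) (out : String × String × String) : Decidable (Spec_solution data customer_action out) := by unfold Spec_solution; infer_instance

-- ===== CLAIM (what is proved, stated in full; the proofs are below) =====
def Claim_equal_solution : Prop := ∀ (data : List Int) (customer_action : List Int), Dom_solution data customer_action → Pre_solution data customer_action → Spec_solution data customer_action (solution data customer_action)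

-- ===== LEMMAS AND PROOFS =====

-- per-element contribution triple
def contrib (lp dp combo : Int) (a : Int) : Int × Int × Int :=
  if a = 1 then (1, 0, lp) else if a = 2 then (0, 1, dp) else (1, 1, combo)

-- sum of contributions (reference semantics both ports are reduced to)
def sumc (lp dp combo : Int) : List Int → Int × Int × Int
  | [] => (0, 0, 0)
  | x :: xs =>
    let c := contrib lp dp combo x
    let s := sumc lp dp combo xs
    (c.1 + s.1, c.2.1 + s.2.1, c.2.2 + s.2.2)

theorem sumc_append (lp dp combo : Int) (xs ys : List Int) :
    sumc lp dp combo (xs ++ ys) =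
      ((sumc lp dp combo xs).1 + (sumc lp dp combo ys).1,
       (sumc lp dp combo xs).2.1 + (sumc lp dp combo ys).2.1,
       (sumc lp dp combo xs).2.2 + (sumc lp dp combo ys).2.2) := by
  induction xs with
  | nil => simp [sumc]
  | cons x xs ih =>
    simp only [List.cons_append, sumc, ih]
    refine Prod.ext ?_ (Prod.ext ?_ ?_) <;> simp <;> ring

theorem if_neg_eq_max (c : Int) : (if c < 0 then (0 : Int) else c) = max c 0 := by
  rcases lt_or_ge c 0 with h | h
  · simp [h, max_eq_right h.le]
  · simp [not_lt.mpr h, max_eq_left h]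

theorem aggB_eq_sumc (lp dp combo : Int) (fuel : Nat) (acts : List Int)
    (h : acts.length ≤ fuel) :
    aggB lp dp combo fuel acts = sumc lp dp combo acts := by
  induction fuel generalizing acts with
  | zero =>
    match acts, h with
    | [], _ => simp [aggB, sumc]
  | succ fuel ih =>
    match acts with
    | [] => simp [aggB, sumc]
    | [a] =>
      simp only [aggB, sumc, contrib]
      split_ifs <;> simp
    | x :: y :: rest =>
      have hlen : (x :: y :: rest).length ≤ fuel + 1 := h
      have htake : ((x :: y :: rest).take ((x :: y :: rest).length / 2)).length ≤ fuel := by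
        simp only [List.length_take, List.length_cons] at *; omega
      have hdrop : ((x :: y :: rest).drop ((x :: y :: rest).length / 2)).length ≤ fuel := by
        simp only [List.length_drop, List.length_cons] at *; omega
      rw [aggB, ih _ htake, ih _ hdrop, ← sumc_append, List.take_append_drop]

theorem foldlA_eq_sumc (lp dp disc : Int) (xs : List Int) (st : Int × Int × Int) :
    xs.foldl (fun (st : Int × Int × Int) each =>
      if each = 1 then (st.1 + 1, st.2.1, st.2.2 + lp)
      else if each = 2 then (st.1, st.2.1 + 1, st.2.2 + dp)
      else
        let result := lp + dp - disc
        let result := if result < 0 then 0 else result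
        (st.1 + 1, st.2.1 + 1, st.2.2 + result)) st
    = (st.1 + (sumc lp dp (if lp + dp - disc < 0 then 0 else lp + dp - disc) xs).1,
       st.2.1 + (sumc lp dp (if lp + dp - disc < 0 then 0 else lp + dp - disc) xs).2.1,
       st.2.2 + (sumc lp dp (if lp + dp - disc < 0 then 0 else lp + dp - disc) xs).2.2) := by
  induction xs generalizing st with
  | nil => simp [sumc]
  | cons x xs ih =>
    simp only [List.foldl_cons, sumc, contrib]
    by_cases h1 : x = 1
    · rw [if_pos h1, ih]
      refine Prod.ext ?_ (Prod.ext ?_ ?_) <;> simp [h1] <;> ring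
    · by_cases h2 : x = 2
      · rw [if_neg h1, if_pos h2, ih]
        refine Prod.ext ?_ (Prod.ext ?_ ?_) <;> simp [h2] <;> ring
      · rw [if_neg h1, if_neg h2, ih]
        refine Prod.ext ?_ (Prod.ext ?_ ?_) <;> simp [h1, h2] <;> ring

-- ===== VERDICT (by name: the statement is the Claim_ definition above) =====
theorem solution_spec : Claim_equal_solution := by
  intro data ca _ _
  unfold Spec_solution solution solution_alt
  simp only [foldlA_eq_sumc]
  rw [aggB_eq_sumc _ _ _ _ ca (le_refl _)]
  simp only [if_neg_eq_max, zero_add]
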